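-- pv_equiv track=rewrite | github.com/DevilPaddy/AquaHumanizer | humanizer.py | is_metadata
-- ===== SOURCE A (Python) =====
-- def is_metadata(line: str) -> bool:
--     """Metadata lines (Title:, Authors:, etc.)."""
--     s = line.strip()
--     if not s:
--         return False
--     labels = ['Title', 'Authors', 'Author', 'Date', 'Copyright', 'Abstract', 'Figure', 'Table', 'Diagram', 'Introduction', 'Conclusion', 'History', 'Background', 'Problem', 'Solution', 'Mechanism', 'Features']
--     for label in labels:
--         if s.startswith(f"{label}:") or s == label:
--             return True
--     return False
-- ===== SOURCE B (Python) =====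
-- _LABELS = frozenset(
--     "Title Authors Author Date Copyright Abstract Figure Table Diagram "
--     "Introduction Conclusion History Background Problem Solution Mechanism Features".split()
-- )
--
-- def is_metadata(line: str) -> bool:
--     """Metadata lines (Title:, Authors:, etc.)."""
--     return line.strip().partition(':')[0] in _LABELS
-- ===== Notes on version B (the rewrite author's own statement) =====
-- stated objective: idiomatic
-- what changed: Replaces A's per-label loop of startswith/equality checks (plus the explicit empty-string guard) with a single partition at the first colon and one membership test of its head in a precomputed frozenset built from a whitespace-split word string; the empty line falls out of membership automatically.
import Mathlib
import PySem

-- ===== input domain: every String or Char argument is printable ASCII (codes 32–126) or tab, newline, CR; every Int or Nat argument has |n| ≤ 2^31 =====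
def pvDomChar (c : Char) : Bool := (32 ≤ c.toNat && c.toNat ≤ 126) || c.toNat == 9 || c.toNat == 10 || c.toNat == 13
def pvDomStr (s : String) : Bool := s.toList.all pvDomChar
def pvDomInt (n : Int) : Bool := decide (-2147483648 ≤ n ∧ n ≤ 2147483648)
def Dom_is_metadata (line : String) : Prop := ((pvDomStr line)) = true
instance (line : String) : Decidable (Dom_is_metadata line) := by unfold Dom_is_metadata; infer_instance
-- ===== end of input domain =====

-- B replaces A's per-label loop of startswith/equality checks (and its empty-string
-- guard) by one partition at the first colon and one set-membership test (idiomatic).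

-- ===== PORT A =====
-- the literal `labels` list of A
def pvLabels : List (List Char) :=
  ["Title".toList, "Authors".toList, "Author".toList, "Date".toList, "Copyright".toList,
   "Abstract".toList, "Figure".toList, "Table".toList, "Diagram".toList, "Introduction".toList,
   "Conclusion".toList, "History".toList, "Background".toList, "Problem".toList,
   "Solution".toList, "Mechanism".toList, "Features".toList]

-- A's `for label in labels: if s.startswith(label + ":") or s == label: return True`
def pvLoopA (s : List Char) : List (List Char) → Bool
  | [] => false
  | L :: rest =>
      if PySem.Chars.startswith s (L ++ [':']) || s == L then true
      else pvLoopA s rest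

def is_metadata (line : String) : Bool :=
  let s := PySem.Chars.strip line.toList
  if s = [] then false
  else pvLoopA s pvLabels

-- ===== PORT B =====
-- B's `frozenset("...".split())`
def pvLabelWords : PySem.Set (List Char) :=
  PySem.Set.ofList (PySem.Chars.split₀
    ("Title Authors Author Date Copyright Abstract Figure Table Diagram " ++
     "Introduction Conclusion History Background Problem Solution Mechanism Features").toList)

-- `s.partition(':')[0]` for the single-character separator ':' is exactly the
-- longest colon-free prefix of s, i.e. takeWhile (· ≠ ':') — ported by hand, exact.
def is_metadata_alt (line : String) : Bool :=
  pvLabelWords.contains ((PySem.Chars.strip line.toList).takeWhile (fun c => c ≠ ':'))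

-- ===== PRECONDITION & SPEC =====
def Spec_is_metadata (line : String) (out : Bool) : Prop := out = is_metadata_alt line
instance (line : String) (out : Bool) : Decidable (Spec_is_metadata line out) := by unfold Spec_is_metadata; infer_instance

-- ===== CLAIM (what is proved, stated in full; the proofs are below) =====
def Claim_equal_is_metadata : Prop := ∀ (line : String), Dom_is_metadata line → Spec_is_metadata line (is_metadata line)

-- ===== LEMMAS AND PROOFS =====

-- for a colon-free label L: A's per-label test decides exactly "the colon-free prefix of s is L"
theorem pv_label_test_iff (s L : List Char) (hL : ':' ∉ L) :
    (PySem.Chars.startswith s (L ++ [':']) || s == L) = true ↔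
      s.takeWhile (fun c => decide (c ≠ ':')) = L := by
  constructor
  · intro h
    rcases Bool.or_eq_true .. |>.mp h with h | h
    · obtain ⟨u, hu⟩ := PySem.Chars.startswith_iff _ _ |>.mp h
      have hs : s = L ++ ':' :: u := by simpa using hu.symm
      rw [hs, List.takeWhile_append]
      simp only [List.takeWhile_cons]
      rw [List.takeWhile_eq_self_iff.mpr (fun c hc => by simp; rintro rfl; exact hL hc)]
      simp
    · have hs : s = L := by simpa using h
      rw [hs, List.takeWhile_eq_self_iff.mpr (fun c hc => by simp; rintro rfl; exact hL hc)]
  · intro h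
    have hsplit : s = L ++ s.dropWhile (fun c => decide (c ≠ ':')) := by
      conv_lhs => rw [← List.takeWhile_append_dropWhile (p := fun c => decide (c ≠ ':')) (l := s)]
      rw [h]
    rw [Bool.or_eq_true]
    cases hd : s.dropWhile (fun c => decide (c ≠ ':')) with
    | nil =>
        right
        rw [hd] at hsplit; simp at hsplit; simp [hsplit]
    | cons a u =>
        have ha : ¬ (decide (a ≠ ':')) = true := by
          have := List.head?_dropWhile_not (p := fun c => decide (c ≠ ':')) (l := s)
          rw [hd] at this; simpa using this
        have ha' : a = ':' := by simpa using ha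
        left
        rw [PySem.Chars.startswith_iff]
        exact ⟨u, by rw [hd, ha'] at hsplit; simpa using hsplit.symm⟩

-- A's loop is membership of the colon-free prefix in the label list
theorem pv_loopA_eq (s : List Char) (labels : List (List Char))
    (hcol : ∀ L ∈ labels, ':' ∉ L) :
    pvLoopA s labels = labels.contains (s.takeWhile (fun c => decide (c ≠ ':'))) := by
  induction labels with
  | nil => rfl
  | cons L rest ih =>
      rw [pvLoopA, List.contains_cons]
      by_cases h : (PySem.Chars.startswith s (L ++ [':']) || s == L) = true
      · have hk := (pv_label_test_iff s L (hcol L List.mem_cons_self)).mp h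
        rw [if_pos h, hk]; simp
      · have hne : s.takeWhile (fun c => decide (c ≠ ':')) ≠ L :=
          fun hk => h ((pv_label_test_iff s L (hcol L List.mem_cons_self)).mpr hk)
        rw [if_neg h, ih (fun M hM => hcol M (List.mem_cons_of_mem _ hM))]
        have hb : (s.takeWhile (fun c => decide (c ≠ ':')) == L) = false := by simpa using hne
        rw [hb, Bool.false_or]

-- A's labels contain no colon
set_option maxRecDepth 4000 in
theorem pv_labels_no_colon : ∀ L ∈ pvLabels, ':' ∉ L := by decide

-- B's word set has the same membership as A's label list
set_option maxRecDepth 10000 in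
theorem pv_words_eq : ∀ x, pvLabelWords.contains x = pvLabels.contains x := by
  intro x
  have h : pvLabelWords = pvLabels := by decide
  rw [h]; simp [PySem.Set.contains]

-- the empty line is not in B's word set
set_option maxRecDepth 10000 in
theorem pv_empty_not_word : pvLabelWords.contains (List.takeWhile (fun c => decide (c ≠ ':')) []) = false := by decide

-- ===== VERDICT (by name: the statement is the Claim_ definition above) =====
theorem is_metadata_spec : Claim_equal_is_metadata := by
  intro line _
  unfold Spec_is_metadata is_metadata is_metadata_alt
  set s := PySem.Chars.strip line.toList with hs
  by_cases hnil : s = []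
  · rw [if_pos hnil, hnil]
    simpa using pv_empty_not_word.symm
  · rw [if_neg hnil, pv_loopA_eq s pvLabels pv_labels_no_colon, pv_words_eq]
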